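-- pv_equiv track=rewrite | github.com/memgrafter/research-crawler-flatagents | research_paper_analysis_v2/quality_sentinel.py | _ground_numbers
-- ===== SOURCE A (Python) =====
-- from typing import Dict, List, Optional, Tuple
--
-- def _number_variants(token: str) -> List[str]:
--     """Generate string variants for robust text containment checks."""
--     t = (token or "").strip()
--     if not t:
--         return []
--
--     variants = {t.lower()}
--     plain = t.replace(",", "").lower()
--     variants.add(plain)
--
--     if plain.endswith("%"):
--         variants.add(plain[:-1])
--     if plain.endswith(("k", "m", "b")) and len(plain) > 1:
--         variants.add(plain[:-1])
--
--     # If integer-like float (e.g., 83.0), add integer variant.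
--     try:
--         if "." in plain and plain.replace(".", "", 1).replace("-", "", 1).isdigit():
--             f = float(plain)
--             if f.is_integer():
--                 variants.add(str(int(f)))
--     except ValueError:
--         pass
--
--     return sorted(v for v in variants if v)
--
-- def _ground_numbers(numbers: List[str], paper_text: str) -> Tuple[List[str], List[str]]:
--     grounded: List[str] = []
--     ungrounded: List[str] = []
--     hay = (paper_text or "").lower()
--
--     for n in numbers:
--         variants = _number_variants(n)
--         if any(v in hay for v in variants):
--             grounded.append(n)
--         else:
--             ungrounded.append(n)
--
--     return grounded, ungrounded
-- ===== SOURCE B (Python) =====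
-- from typing import List, Tuple
--
-- def _candidates(token):
--     """Nonempty candidate strings whose presence in the text grounds the token."""
--     t = token.strip()
--     if not t:
--         return []
--     low = t.lower()
--     plain = t.replace(",", "").lower()
--     cands = [low, plain]
--     if plain.endswith("%"):
--         cands.append(plain[:-1])
--     if plain.endswith(("k", "m", "b")) and len(plain) > 1:
--         cands.append(plain[:-1])
--     if "." in plain and plain.replace(".", "", 1).replace("-", "", 1).isdigit():
--         try:
--             f = float(plain)
--             if f.is_integer():
--                 cands.append(str(int(f)))
--         except ValueError:
--             pass
--     return [c for c in cands if c]
--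
-- def _ground_numbers(numbers: List[str], paper_text: str) -> Tuple[List[str], List[str]]:
--     hay = (paper_text or "").lower()
--     entries = [(n, _candidates(n)) for n in numbers]
--     # Hash index: all substrings of the text at the candidate lengths, built by
--     # scanning the text once per distinct length; membership is then O(1) per candidate.
--     lengths = {len(c) for _, cs in entries for c in cs}
--     grams = set()
--     for L in lengths:
--         for i in range(len(hay) - L + 1):
--             grams.add(hay[i:i + L])
--     grounded: List[str] = []
--     ungrounded: List[str] = []
--     for n, cs in entries:
--         (grounded if any(c in grams for c in cs) else ungrounded).append(n)
--     return grounded, ungrounded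
-- ===== Notes on version B (the rewrite author's own statement) =====
-- stated objective: faster
-- what changed: B replaces A's per-variant substring scans of the text by a precomputed hash index: one pass over the text per distinct candidate length collects every substring of that length into a set, so each candidate is then checked by an O(1) set lookup instead of an O(M) text scan.
import Mathlib
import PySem

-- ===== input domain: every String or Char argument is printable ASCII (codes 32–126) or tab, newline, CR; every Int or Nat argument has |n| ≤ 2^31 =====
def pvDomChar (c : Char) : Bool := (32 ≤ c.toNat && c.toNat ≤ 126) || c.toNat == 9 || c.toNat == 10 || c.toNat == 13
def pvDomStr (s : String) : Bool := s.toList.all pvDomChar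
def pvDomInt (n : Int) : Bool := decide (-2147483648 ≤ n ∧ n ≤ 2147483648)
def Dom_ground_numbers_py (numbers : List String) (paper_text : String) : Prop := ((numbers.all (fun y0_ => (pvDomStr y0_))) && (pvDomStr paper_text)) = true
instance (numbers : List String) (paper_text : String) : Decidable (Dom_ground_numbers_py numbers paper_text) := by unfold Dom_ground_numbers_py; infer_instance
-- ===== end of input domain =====

-- B replaces A's per-variant substring scans of the text by a hash index of the text's substrings at the
-- candidate lengths (one text pass per distinct length, then O(1) set lookups); measured faster on the
-- generated timing inputs; same return value as A.

-- ===== shared hand-ported primitives (both Pythons contain these very expressions) =====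

-- s.replace(old, "", 1) for a single character old (Python str.replace with count=1); exact
def pvRemoveFirst (t : Char) : List Char → List Char
  | [] => []
  | c :: cs => if c = t then cs else c :: pvRemoveFirst t cs

-- round p/q to the nearest integer, ties to even (q > 0); the IEEE-754 rounding rule
def pvRoundHalfEven (p q : Nat) : Nat :=
  let t := p / q
  let r := p % q
  if 2 * r < q then t else if q < 2 * r then t + 1 else if t % 2 = 0 then t else t + 1

-- the binary64 double nearest to n/d (n > 0, d > 0), reported as `some v` when it is the integer v
-- (after round-to-nearest-even, including underflow to 0.0 and overflow to inf, which is not an integer)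
def pvDoubleIntOfRat (n d : Nat) : Option Nat :=
  let a := Nat.log2 n
  let b := Nat.log2 d
  let e : Int := if (if b ≤ a then d * 2 ^ (a - b) ≤ n else d ≤ n * 2 ^ (b - a)) then (a : Int) - b else (a : Int) - b - 1
  if e < -1022 then
    -- subnormal range, anchored at 2^-1074: integer only when it underflows to 0.0
    if pvRoundHalfEven (n * 2 ^ 1074) d = 0 then some 0 else none
  else
    let s : Nat := ((52 : Int) - e).toNat
    let t : Nat := (e - 52).toNat
    let m := pvRoundHalfEven (n * 2 ^ s) (d * 2 ^ t)
    let me : Nat × Int := if m = 2 ^ 53 then (2 ^ 52, e + 1) else (m, e)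
    if 1024 ≤ me.2 then none                                   -- rounds to inf: not an integer
    else if 52 ≤ me.2 then some (me.1 * 2 ^ (me.2 - 52).toNat)
    else if me.2 < 0 then none                                 -- 0 < f < 1
    else if me.1 % 2 ^ ((52 : Int) - me.2).toNat = 0 then some (me.1 / 2 ^ ((52 : Int) - me.2).toNat) else none

-- decimal value of a digit string (Python int of the concatenated digits)
def pvDigitsVal (cs : List Char) : Nat := cs.foldl (fun a c => 10 * a + (c.toNat - 48)) 0

-- hand port of the try-block both Pythons contain verbatim:
--   try: f = float(plain); if f.is_integer(): <str(int(f))>  except ValueError: <none>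
-- exact for the strings reaching it (one '.', all other chars digits except at most one '-'):
-- float() raises exactly when a '-' is not the leading character; otherwise the IEEE-754 double is
-- computed exactly by pvDoubleIntOfRat and str(int(f)) is its decimal representation
def pvFloatIntVariant (plain : List Char) : Option (List Char) :=
  let nr : Bool × List Char := if plain.head? = some '-' then (true, plain.tail) else (false, plain)
  if '-' ∈ nr.2 then none
  else
    let ip := nr.2.takeWhile (· ≠ '.')
    let fp := (nr.2.dropWhile (· ≠ '.')).drop 1
    let n := pvDigitsVal (ip ++ fp)
    if n = 0 then some ['0']   -- ±0.0: is_integer, str(int(±0.0)) = "0"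
    else
      match pvDoubleIntOfRat n (10 ^ fp.length) with
      | none => none
      | some v => some (if nr.1 ∧ v ≠ 0 then '-' :: PySem.Int.toChars (v : Int) else PySem.Int.toChars (v : Int))

-- ===== PORT A =====

-- port of _number_variants (pvVariantsCore is the body once t is known nonempty)
def pvVariantsCore (tl plain : String) : List String :=
  let s2 := PySem.Set.add (PySem.Set.ofList [tl]) plain
  let s3 := if PySem.Str.endswith plain "%" = true then
      PySem.Set.add s2 (PySem.Str.slice plain none (some (-1))) else s2
  let s4 := if (PySem.Str.endswith plain "k" || PySem.Str.endswith plain "m" || PySem.Str.endswith plain "b") = true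
      ∧ 1 < PySem.Str.len plain then
      PySem.Set.add s3 (PySem.Str.slice plain none (some (-1))) else s3
  let s5 := if ('.' ∈ plain.toList)
      ∧ PySem.Chars.strIsdigit (pvRemoveFirst '-' (pvRemoveFirst '.' plain.toList)) = true then
      match pvFloatIntVariant plain.toList with
      | some w => PySem.Set.add s4 (String.ofList w)
      | none => s4
    else s4
  PySem.List.sorted (s5.filter (fun x => x ≠ "")) (fun x => x) false

def pvNumberVariants (token : String) : List String :=
  let t := PySem.Str.strip token
  if t = "" then []
  else pvVariantsCore (PySem.Str.lower t) (PySem.Str.lower (PySem.Str.replace t "," ""))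

def ground_numbers_py (numbers : List String) (paper_text : String) : List String × List String :=
  let hay := PySem.Str.lower paper_text
  numbers.foldl (fun (acc : List String × List String) n =>
    if (pvNumberVariants n).any (fun v => PySem.Str.isIn v hay) then (acc.1 ++ [n], acc.2)
    else (acc.1, acc.2 ++ [n])) ([], [])

-- ===== PORT B =====

-- port of _candidates (pvCandsCore is the body once t is known nonempty)
def pvCandsCore (low plain : String) : List String :=
  let cands := [low, plain]
  let cands := if PySem.Str.endswith plain "%" = true then
      cands ++ [PySem.Str.slice plain none (some (-1))] else cands
  let cands := if (PySem.Str.endswith plain "k" || PySem.Str.endswith plain "m" || PySem.Str.endswith plain "b") = true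
      ∧ 1 < PySem.Str.len plain then
      cands ++ [PySem.Str.slice plain none (some (-1))] else cands
  let cands := if ('.' ∈ plain.toList)
      ∧ PySem.Chars.strIsdigit (pvRemoveFirst '-' (pvRemoveFirst '.' plain.toList)) = true then
      match pvFloatIntVariant plain.toList with
      | some w => cands ++ [String.ofList w]
      | none => cands
    else cands
  cands.filter (fun c => c ≠ "")

def pvCandidates (token : String) : List String :=
  let t := PySem.Str.strip token
  if t = "" then []
  else pvCandsCore (PySem.Str.lower t) (PySem.Str.lower (PySem.Str.replace t "," ""))

-- the hash index: all substrings of hay at the lengths in `lengths` (one pass of hay per length)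
def pvGrams (hay : String) (lengths : PySem.Set Int) : PySem.Set String :=
  lengths.foldl (fun g L =>
    (PySem.List.pyRange 0 (PySem.Str.len hay - L + 1)).foldl (fun g i =>
      PySem.Set.add g (PySem.Str.slice hay (some i) (some (i + L)))) g) PySem.Set.empty

def ground_numbers_py_alt (numbers : List String) (paper_text : String) : List String × List String :=
  let hay := PySem.Str.lower paper_text
  let entries := numbers.map (fun n => (n, pvCandidates n))
  let lengths : PySem.Set Int :=
    PySem.Set.ofList (entries.flatMap (fun e => e.2.map (fun c => PySem.Str.len c)))
  let grams : PySem.Set String := pvGrams hay lengths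
  entries.foldl (fun (acc : List String × List String) e =>
    if e.2.any (fun c => PySem.Set.contains grams c) then (acc.1 ++ [e.1], acc.2)
    else (acc.1, acc.2 ++ [e.1])) ([], [])

-- ===== PRECONDITION & SPEC =====
def Spec_ground_numbers_py (numbers : List String) (paper_text : String) (out : List String × List String) : Prop := out = ground_numbers_py_alt numbers paper_text
instance (numbers : List String) (paper_text : String) (out : List String × List String) : Decidable (Spec_ground_numbers_py numbers paper_text out) := by unfold Spec_ground_numbers_py; infer_instance

-- ===== CLAIM (what is proved, stated in full; the proofs are below) =====
def Claim_equal_ground_numbers_py : Prop := ∀ (numbers : List String) (paper_text : String), Dom_ground_numbers_py numbers paper_text → Spec_ground_numbers_py numbers paper_text (ground_numbers_py numbers paper_text)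

-- ===== LEMMAS AND PROOFS =====

-- A's variant list and B's candidate list hold the same strings
set_option maxHeartbeats 1000000 in
theorem pvCore_mem (low plain x : String) :
    x ∈ pvVariantsCore low plain ↔ x ∈ pvCandsCore low plain := by
  unfold pvVariantsCore pvCandsCore
  cases hopt : pvFloatIntVariant plain.toList <;>
    (split_ifs <;>
       simp [PySem.List.mem_sorted, List.mem_filter, PySem.Set.mem_add, PySem.Set.mem_ofList,
         or_assoc])

theorem pvVariants_mem_iff (n x : String) :
    x ∈ pvNumberVariants n ↔ x ∈ pvCandidates n := by
  unfold pvNumberVariants pvCandidates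
  by_cases h : PySem.Str.strip n = ""
  · simp [h]
  · rw [if_neg h, if_neg h]
    exact pvCore_mem _ _ x

-- unrolling the index-building double loop
theorem pvGramsAux (hay c : String) :
    ∀ (ls : List Int) (g : PySem.Set String),
      c ∈ ls.foldl (fun g L =>
          (PySem.List.pyRange 0 (PySem.Str.len hay - L + 1)).foldl (fun g i =>
            PySem.Set.add g (PySem.Str.slice hay (some i) (some (i + L)))) g) g
      ↔ c ∈ g ∨ ∃ L ∈ ls, ∃ i ∈ PySem.List.pyRange 0 (PySem.Str.len hay - L + 1),
          c = PySem.Str.slice hay (some i) (some (i + L)) := by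
  intro ls
  induction ls with
  | nil => intro g; simp
  | cons L rest ih =>
    intro g
    rw [List.foldl_cons, ih, ← PySem.Set.update_map_eq_foldl_add, PySem.Set.mem_update]
    simp only [List.mem_map, List.mem_cons, PySem.List.mem_pyRange_one]
    constructor
    · rintro (((hg | ⟨i, hi, rfl⟩) ) | ⟨L', hL', hrest⟩)
      · exact Or.inl hg
      · exact Or.inr ⟨L, Or.inl rfl, i, hi, rfl⟩
      · exact Or.inr ⟨L', Or.inr hL', hrest⟩
    · rintro (hg | ⟨L', hL' | hL', i, hi, hc⟩)
      · exact Or.inl (Or.inl hg)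
      · subst hL'; exact Or.inl (Or.inr ⟨i, hi, hc.symm⟩)
      · exact Or.inr ⟨L', hL', i, hi, hc⟩

-- membership in the hash index, characterised
theorem mem_pvGrams (hay : String) (ls : PySem.Set Int) (c : String) :
    c ∈ pvGrams hay ls ↔ ∃ L ∈ ls, ∃ i ∈ PySem.List.pyRange 0 (PySem.Str.len hay - L + 1),
      c = PySem.Str.slice hay (some i) (some (i + L)) := by
  unfold pvGrams
  rw [pvGramsAux]
  simp [PySem.Set.empty]

-- every slice of hay is a substring of hay
theorem pvSlice_isIn (hay : String) (a b : Int) :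
    PySem.Str.isIn (PySem.Str.slice hay (some a) (some b)) hay = true := by
  rw [PySem.Str.isIn_eq, PySem.Str.toList_slice, PySem.Chars.slice_eq_listSlice,
    PySem.Chars.isIn_iff_infix]
  have hs : PySem.List.slice hay.toList (some a) (some b)
      = (List.drop (PySem.List.clampIdx hay.toList.length a) hay.toList).take
        (PySem.List.clampIdx hay.toList.length b - PySem.List.clampIdx hay.toList.length a) := by
    simp [PySem.List.slice]
  rw [hs]
  exact ((List.take_prefix _ _).isInfix).trans ((List.drop_suffix _ _).isInfix)

-- a substring of hay is a slice at an index of the scan range for its length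
theorem pvInfix_slice (hay c : String) (hin : PySem.Str.isIn c hay = true) :
    ∃ i ∈ PySem.List.pyRange 0 (PySem.Str.len hay - PySem.Str.len c + 1),
      c = PySem.Str.slice hay (some i) (some (i + PySem.Str.len c)) := by
  rw [PySem.Str.isIn_eq, PySem.Chars.isIn_iff_infix] at hin
  obtain ⟨p, s, hps⟩ := hin
  have hlen : p.length + c.toList.length ≤ hay.toList.length := by
    rw [← hps]
    simp [List.length_append]
  refine ⟨(p.length : Int), ?_, ?_⟩
  · rw [PySem.List.mem_pyRange_one, PySem.Str.len_eq, PySem.Str.len_eq]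
    constructor
    · exact_mod_cast Nat.zero_le _
    · omega
  · apply String.toList_inj.mp
    rw [PySem.Str.toList_slice, PySem.Chars.slice_eq_listSlice, PySem.Str.len_eq]
    have hcast : (p.length : Int) + (c.toList.length : Int)
        = (((p.length + c.toList.length : Nat) : Nat) : Int) := by push_cast; ring
    rw [hcast, PySem.List.slice_natCast, ← hps, List.append_assoc, List.drop_left,
      Nat.add_sub_cancel_left, List.take_left]

-- the index lookup agrees with Python's `c in hay` whenever c's length is indexed
theorem pvGrams_contains (hay : String) (ls : PySem.Set Int) (c : String)
    (h : PySem.Str.len c ∈ ls) :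
    PySem.Set.contains (pvGrams hay ls) c = PySem.Str.isIn c hay := by
  rw [Bool.eq_iff_iff, PySem.Set.contains_iff, mem_pvGrams]
  constructor
  · rintro ⟨L, _, i, _, rfl⟩
    exact pvSlice_isIn hay i (i + L)
  · intro hin
    obtain ⟨i, hi, hc⟩ := pvInfix_slice hay c hin
    exact ⟨PySem.Str.len c, h, i, hi, hc⟩

-- per-token: A's any-variant-in-hay equals B's any-candidate-in-index
theorem pvTok_eq (hay : String) (ls : PySem.Set Int) (n : String)
    (h : ∀ c ∈ pvCandidates n, PySem.Str.len c ∈ ls) :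
    (pvNumberVariants n).any (fun v => PySem.Str.isIn v hay)
      = (pvCandidates n).any (fun c => PySem.Set.contains (pvGrams hay ls) c) := by
  rw [Bool.eq_iff_iff, List.any_eq_true, List.any_eq_true]
  constructor
  · rintro ⟨v, hv, hiv⟩
    have hvc := (pvVariants_mem_iff n v).mp hv
    exact ⟨v, hvc, by rw [pvGrams_contains hay ls v (h v hvc)]; exact hiv⟩
  · rintro ⟨c, hc, hcc⟩
    exact ⟨c, (pvVariants_mem_iff n c).mpr hc, by rwa [pvGrams_contains hay ls c (h c hc)] at hcc⟩

-- ===== VERDICT (by name: the statement is the Claim_ definition above) =====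
theorem ground_numbers_py_spec : Claim_equal_ground_numbers_py := by
  intro numbers paper_text _
  unfold Spec_ground_numbers_py ground_numbers_py ground_numbers_py_alt
  rw [List.foldl_map]
  refine (PySem.List.foldl_congr_mem _ _ _ _ ?_).symm
  intro acc n hn
  have hlen : ∀ c ∈ pvCandidates n, PySem.Str.len c ∈
      (PySem.Set.ofList ((numbers.map (fun n => (n, pvCandidates n))).flatMap
        (fun e => e.2.map (fun c => PySem.Str.len c))) : PySem.Set Int) := by
    intro c hc
    rw [PySem.Set.mem_ofList, List.mem_flatMap]
    exact ⟨(n, pvCandidates n), List.mem_map_of_mem hn, List.mem_map_of_mem hc⟩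
  rw [pvTok_eq (PySem.Str.lower paper_text) _ n hlen]
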